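-- pv_equiv track=rewrite | github.com/AT-UNDERMINER/cp1404practicals | prac_04/memberwise_addition.py | add_memberwise
-- ===== SOURCE A (Python) =====
-- def add_memberwise(list1, list2):
--     """Return a new list where each element is the sum of corresponding
--     elements from list1 and list2. If one list is shorter, missing values
--     are treated as zero.
--     """
--     len1 = len(list1)
--     len2 = len(list2)
--     max_len = len1 if len1 > len2 else len2
--     result = []
--     for i in range(max_len):
--         v1 = list1[i] if i < len1 else 0
--         v2 = list2[i] if i < len2 else 0
--         result.append(v1 + v2)
--     return result
-- ===== SOURCE B (Python) =====
-- def add_memberwise(list1, list2):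
--     """Memberwise sum; pairwise-add the common prefix with zip, then
--     append the surplus tail of whichever list is longer."""
--     n = min(len(list1), len(list2))
--     result = [a + b for a, b in zip(list1, list2)]
--     result += list1[n:]
--     result += list2[n:]
--     return result
-- ===== Notes on version B (the rewrite author's own statement) =====
-- stated objective: idiomatic
-- what changed: Replaces index-based iteration over range(max_len) with per-index bounds tests by a zip over the common prefix plus appending the longer list's surplus tail slices; no max_len and no positional indexing.
import Mathlib
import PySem

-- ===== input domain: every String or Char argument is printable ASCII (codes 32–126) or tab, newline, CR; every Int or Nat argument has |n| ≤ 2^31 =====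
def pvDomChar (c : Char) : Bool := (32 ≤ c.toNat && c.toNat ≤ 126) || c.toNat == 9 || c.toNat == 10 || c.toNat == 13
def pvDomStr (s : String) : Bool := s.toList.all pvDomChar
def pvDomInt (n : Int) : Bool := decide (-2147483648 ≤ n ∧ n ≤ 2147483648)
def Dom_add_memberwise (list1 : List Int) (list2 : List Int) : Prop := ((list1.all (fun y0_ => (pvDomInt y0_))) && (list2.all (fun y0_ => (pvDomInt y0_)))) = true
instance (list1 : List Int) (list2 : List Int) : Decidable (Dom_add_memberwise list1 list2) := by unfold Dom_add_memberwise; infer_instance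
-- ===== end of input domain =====

-- B pairwise-adds the common prefix with zip and appends the longer list's surplus tail (idiomatic); A loops over range(max_len) with per-index bounds tests. Return values proved equal.

-- ===== PORT A =====
def add_memberwise (list1 : List Int) (list2 : List Int) : List Int :=
  let len1 : Int := (list1.length : Int)
  let len2 : Int := (list2.length : Int)
  let max_len : Int := if len1 > len2 then len1 else len2
  (PySem.List.pyRange 0 max_len 1).foldl
    (fun result i =>
      let v1 : Int := if i < len1 then (PySem.List.pyGet? list1 i).getD 0 else 0
      let v2 : Int := if i < len2 then (PySem.List.pyGet? list2 i).getD 0 else 0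
      result ++ [v1 + v2]) []

-- ===== PORT B =====
def add_memberwise_alt (list1 : List Int) (list2 : List Int) : List Int :=
  let n := min list1.length list2.length
  ((list1.zip list2).map (fun p => p.1 + p.2)) ++ list1.drop n ++ list2.drop n

-- ===== PRECONDITION & SPEC =====
def Spec_add_memberwise (list1 : List Int) (list2 : List Int) (out : List Int) : Prop := out = add_memberwise_alt list1 list2
instance (list1 : List Int) (list2 : List Int) (out : List Int) : Decidable (Spec_add_memberwise list1 list2 out) := by unfold Spec_add_memberwise; infer_instance

-- ===== CLAIM (what is proved, stated in full; the proofs are below) =====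
def Claim_equal_add_memberwise : Prop := ∀ (list1 : List Int) (list2 : List Int), Dom_add_memberwise list1 list2 → Spec_add_memberwise list1 list2 (add_memberwise list1 list2)

-- ===== LEMMAS AND PROOFS =====

-- the per-index value A reads from a list: element if the index is in range, else 0
def pvG (l : List Int) (k : Nat) : Int :=
  if (k : Int) < (l.length : Int) then ((PySem.List.pyGet? l (k : Int)).getD 0) else 0

theorem pvG_nil (k : Nat) : pvG [] k = 0 := by simp [pvG]

theorem pvG_zero (a : Int) (t : List Int) : pvG (a :: t) 0 = a := by simp [pvG]

theorem pvG_succ (a : Int) (t : List Int) (k : Nat) : pvG (a :: t) (k + 1) = pvG t k := by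
  simp [pvG]

theorem pvG_self (l : List Int) : (List.range l.length).map (fun k => pvG l k) = l := by
  induction l with
  | nil => simp
  | cons a t ih =>
    rw [List.length_cons, List.range_succ_eq_map, List.map_cons, List.map_map, pvG_zero]
    congr 1
    calc (List.range t.length).map ((fun k => pvG (a :: t) k) ∘ Nat.succ)
        = (List.range t.length).map (fun k => pvG t k) := by
          apply List.map_congr_left; intro k _; simp [pvG_succ]
      _ = t := ih

theorem pv_main (l1 l2 : List Int) :
    (List.range (max l1.length l2.length)).map (fun k => pvG l1 k + pvG l2 k) =
      add_memberwise_alt l1 l2 := by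
  induction l1 generalizing l2 with
  | nil =>
    simp only [add_memberwise_alt, List.length_nil, List.drop_zero, List.zip_nil_left,
      List.map_nil, List.nil_append, List.drop_nil, Nat.max_eq_right (Nat.zero_le _),
      Nat.min_eq_left (Nat.zero_le _)]
    calc (List.range l2.length).map (fun k => pvG [] k + pvG l2 k)
        = (List.range l2.length).map (fun k => pvG l2 k) := by
          apply List.map_congr_left; intro k _; rw [pvG_nil, zero_add]
      _ = l2 := pvG_self l2
  | cons a t1 ih =>
    cases l2 with
    | nil =>
      simp only [add_memberwise_alt, List.length_nil, List.zip_nil_right, List.map_nil,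
        List.nil_append, List.drop_nil, List.append_nil, Nat.min_eq_right (Nat.zero_le _),
        Nat.max_eq_left (Nat.zero_le _), List.drop_zero, List.nil_append]
      calc (List.range (a :: t1).length).map (fun k => pvG (a :: t1) k + pvG [] k)
          = (List.range (a :: t1).length).map (fun k => pvG (a :: t1) k) := by
            apply List.map_congr_left; intro k _; rw [pvG_nil, add_zero]
        _ = a :: t1 := pvG_self (a :: t1)
    | cons b t2 =>
      have hmax : max (a :: t1).length (b :: t2).length = max t1.length t2.length + 1 := by
        simp
      rw [hmax, List.range_succ_eq_map, List.map_cons, List.map_map, pvG_zero, pvG_zero]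
      have htail : (List.range (max t1.length t2.length)).map
          ((fun k => pvG (a :: t1) k + pvG (b :: t2) k) ∘ Nat.succ) = add_memberwise_alt t1 t2 := by
        rw [← ih t2]
        apply List.map_congr_left
        intro k _
        simp [pvG_succ]
      rw [htail]
      simp [add_memberwise_alt, Nat.succ_min_succ]

theorem pv_A_eq (l1 l2 : List Int) :
    add_memberwise l1 l2 =
      (List.range (max l1.length l2.length)).map (fun k => pvG l1 k + pvG l2 k) := by
  unfold add_memberwise
  rw [PySem.List.foldl_append_singleton_eq_map, List.nil_append]
  have hmax : (if (l1.length : Int) > (l2.length : Int) then (l1.length : Int) else (l2.length : Int))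
      = ((max l1.length l2.length : Nat) : Int) := by
    split_ifs with h <;> push_cast <;> omega
  rw [hmax, PySem.List.pyRange_zero_natCast, List.map_map]
  apply List.map_congr_left
  intro k _
  simp [pvG]

-- ===== VERDICT (by name: the statement is the Claim_ definition above) =====
theorem add_memberwise_spec : Claim_equal_add_memberwise := by
  intro l1 l2 _
  show add_memberwise l1 l2 = add_memberwise_alt l1 l2
  rw [pv_A_eq, pv_main]
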